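-- pv_equiv track=rewrite | github.com/Amhdour/rag-security-platform | integration-adapter/integration_adapter/exporters.py | _derive_connector_status
-- ===== SOURCE A (Python) =====
-- def _derive_connector_status(credential_statuses: list[str]) -> str:
--     lowered = {status.lower() for status in credential_statuses if status}
--     if not lowered:
--         return "unknown"
--     if lowered & {"active", "scheduled", "initial_indexing"}:
--         return "active"
--     if "paused" in lowered:
--         return "paused"
--     if "deleting" in lowered:
--         return "deleting"
--     if "invalid" in lowered:
--         return "invalid"
--     return sorted(lowered)[0]
-- ===== SOURCE B (Python) =====
-- _STATUS_KEY = {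
--     "active": (0, "active"),
--     "scheduled": (0, "active"),
--     "initial_indexing": (0, "active"),
--     "paused": (1, "paused"),
--     "deleting": (2, "deleting"),
--     "invalid": (3, "invalid"),
-- }
--
--
-- def _derive_connector_status(credential_statuses: list[str]) -> str:
--     best = None
--     for status in credential_statuses:
--         if status:
--             key = _STATUS_KEY.get(status.lower(), (4, status.lower()))
--             if best is None or key < best:
--                 best = key
--     return "unknown" if best is None else best[1]
-- ===== Notes on version B (the rewrite author's own statement) =====
-- stated objective: alternative
-- what changed: Instead of A's set-building plus a four-rung priority ladder of membership tests and a final sort, B maps every status to a (rank, canonical-name) key via a lookup table and reduces the list to the single lexicographically smallest key, returning its name component.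
import Mathlib
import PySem

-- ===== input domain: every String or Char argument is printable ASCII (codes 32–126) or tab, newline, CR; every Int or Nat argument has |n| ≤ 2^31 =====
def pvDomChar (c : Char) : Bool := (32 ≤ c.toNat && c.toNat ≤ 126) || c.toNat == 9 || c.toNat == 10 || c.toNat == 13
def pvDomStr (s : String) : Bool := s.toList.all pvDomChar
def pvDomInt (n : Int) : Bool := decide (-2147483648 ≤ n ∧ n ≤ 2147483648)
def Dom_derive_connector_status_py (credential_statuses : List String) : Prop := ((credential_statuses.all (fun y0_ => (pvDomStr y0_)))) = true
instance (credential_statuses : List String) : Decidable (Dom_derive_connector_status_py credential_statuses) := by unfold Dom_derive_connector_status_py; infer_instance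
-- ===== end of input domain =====

-- B replaces A's set + priority-ladder + sort with a rank-key table and a single
-- lexicographic-minimum reduction (objective: alternative).

-- ===== PORT A =====
def derive_connector_status_py (credential_statuses : List String) : String :=
  let lowered : PySem.Set String :=
    PySem.Set.ofList ((credential_statuses.filter (fun status => !(status == ""))).map PySem.Str.lower)
  if lowered = [] then "unknown"
  else if PySem.Set.inter lowered (PySem.Set.ofList ["active", "scheduled", "initial_indexing"]) ≠ [] then "active"
  else if PySem.Set.contains lowered "paused" then "paused"
  else if PySem.Set.contains lowered "deleting" then "deleting"
  else if PySem.Set.contains lowered "invalid" then "invalid"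
  -- sorted(lowered)[0]: exact here, the set is nonempty on this branch so index 0 is in range
  else PySem.List.pyGetD (PySem.List.sorted lowered (fun x => x) false) 0 ""

-- ===== PORT B =====
-- the module-level dict _STATUS_KEY, built in its insertion order
def dcsStatusKey : PySem.Dict String (Int × String) :=
  ((((((PySem.Dict.empty.insert "active" ((0 : Int), "active")).insert "scheduled"
      (0, "active")).insert "initial_indexing" (0, "active")).insert "paused"
      (1, "paused")).insert "deleting" (2, "deleting")).insert "invalid" (3, "invalid"))

-- Python's '<' on (int, str) tuples: lexicographic (exact transliteration)
def keyLt (a b : Int × String) : Bool :=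
  decide (a.1 < b.1) || (a.1 == b.1 && decide (a.2 < b.2))

-- loop body of B: skip falsy statuses, look up the key, keep the smaller key
def dcsStep (best : Option (Int × String)) (status : String) : Option (Int × String) :=
  if status == "" then best
  else
    let key := PySem.Dict.getD dcsStatusKey (PySem.Str.lower status) (4, PySem.Str.lower status)
    match best with
    | none => some key
    | some b => if keyLt key b then some key else some b

def derive_connector_status_py_alt (credential_statuses : List String) : String :=
  match credential_statuses.foldl dcsStep none with
  | none => "unknown"
  | some b => b.2

-- ===== PRECONDITION & SPEC =====
def Spec_derive_connector_status_py (credential_statuses : List String) (out : String) : Prop := out = derive_connector_status_py_alt credential_statuses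
instance (credential_statuses : List String) (out : String) : Decidable (Spec_derive_connector_status_py credential_statuses out) := by unfold Spec_derive_connector_status_py; infer_instance

-- ===== CLAIM (what is proved, stated in full; the proofs are below) =====
def Claim_equal_derive_connector_status_py : Prop := ∀ (credential_statuses : List String), Dom_derive_connector_status_py credential_statuses → Spec_derive_connector_status_py credential_statuses (derive_connector_status_py credential_statuses)

-- ===== LEMMAS AND PROOFS =====

-- the key function applied to an already-lowered status
def dcsKey (s : String) : Int × String := PySem.Dict.getD dcsStatusKey s (4, s)

theorem dcsKey_spec (s : String) : dcsKey s =
    if s = "active" ∨ s = "scheduled" ∨ s = "initial_indexing" then ((0 : Int), "active")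
    else if s = "paused" then ((1 : Int), "paused")
    else if s = "deleting" then ((2 : Int), "deleting")
    else if s = "invalid" then ((3 : Int), "invalid")
    else ((4 : Int), s) := by
  unfold dcsKey dcsStatusKey
  simp only [PySem.Dict.getD_insert, PySem.Dict.getD_empty]
  split_ifs <;> simp_all

-- the pure min-of-keys step
def minKey (acc : Option (Int × String)) (k : Int × String) : Option (Int × String) :=
  match acc with
  | none => some k
  | some b => if keyLt k b then some k else some b

theorem keyLt_iff (a b : Int × String) : keyLt a b = true ↔ toLex a < toLex b := by
  simp [keyLt, Prod.Lex.lt_iff]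

theorem keyLt_false_iff (a b : Int × String) : keyLt a b = false ↔ toLex b ≤ toLex a := by
  rw [← not_lt, ← keyLt_iff]
  simp

theorem foldl_dcsStep_eq (cs : List String) (st : Option (Int × String)) :
    cs.foldl dcsStep st =
      (((cs.filter (fun c => !(c == ""))).map PySem.Str.lower).map dcsKey).foldl minKey st := by
  induction cs generalizing st with
  | nil => rfl
  | cons x t ih =>
    by_cases hx : x = ""
    · subst hx; simpa [dcsStep] using ih st
    · simp [dcsStep, minKey, dcsKey, hx, ih]

theorem minKey_some (Ks : List (Int × String)) (b : Int × String) :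
    ∃ m, Ks.foldl minKey (some b) = some m ∧ (m = b ∨ m ∈ Ks) ∧ toLex m ≤ toLex b ∧
      ∀ y ∈ Ks, toLex m ≤ toLex y := by
  induction Ks generalizing b with
  | nil => exact ⟨b, rfl, Or.inl rfl, le_refl _, by simp⟩
  | cons x t ih =>
    by_cases hx : keyLt x b = true
    · have hx' : toLex x < toLex b := (keyLt_iff x b).mp hx
      obtain ⟨m, h1, h2, h3, h4⟩ := ih x
      refine ⟨m, by simpa [minKey, hx] using h1, ?_, le_trans h3 (le_of_lt hx'), ?_⟩
      · rcases h2 with h | h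
        · exact Or.inr (by simp [h])
        · exact Or.inr (by simp [h])
      · intro y hy
        rcases List.mem_cons.mp hy with h | h
        · exact h ▸ h3
        · exact h4 y h
    · have hx' : toLex b ≤ toLex x := (keyLt_false_iff x b).mp (by simpa using hx)
      obtain ⟨m, h1, h2, h3, h4⟩ := ih b
      refine ⟨m, by simpa [minKey, hx] using h1, ?_, h3, ?_⟩
      · rcases h2 with h | h
        · exact Or.inl h
        · exact Or.inr (by simp [h])
      · intro y hy
        rcases List.mem_cons.mp hy with h | h
        · exact h ▸ le_trans h3 hx'
        · exact h4 y h

theorem minKey_none (Ks : List (Int × String)) (hK : Ks ≠ []) :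
    ∃ m, Ks.foldl minKey none = some m ∧ m ∈ Ks ∧ ∀ y ∈ Ks, toLex m ≤ toLex y := by
  cases Ks with
  | nil => exact absurd rfl hK
  | cons x t =>
    obtain ⟨m, h1, h2, h3, h4⟩ := minKey_some t x
    refine ⟨m, by simpa [minKey] using h1, ?_, ?_⟩
    · rcases h2 with h | h
      · simp [h]
      · simp [h]
    · intro y hy
      rcases List.mem_cons.mp hy with h | h
      · exact h ▸ h3
      · exact h4 y h

theorem foldl_add_ne_nil {α : Type} [BEq α] (t : List α) (s : PySem.Set α) (hs : s ≠ []) :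
    t.foldl PySem.Set.add s ≠ [] := by
  induction t generalizing s with
  | nil => exact hs
  | cons x r ih =>
    refine ih _ ?_
    simp only [PySem.Set.add]
    split
    · exact hs
    · simp

theorem ofList_eq_nil_iff {α : Type} [BEq α] (xs : List α) :
    PySem.Set.ofList xs = [] ↔ xs = [] := by
  cases xs with
  | nil => simp [PySem.Set.ofList]
  | cons x t =>
    constructor
    · intro h
      exfalso
      refine foldl_add_ne_nil t (PySem.Set.add [] x) (by simp [PySem.Set.add]) ?_
      simpa [PySem.Set.ofList] using h
    · intro h; cases h

theorem inter_ne_nil_iff {α : Type} [BEq α] [LawfulBEq α] (s t : PySem.Set α) :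
    PySem.Set.inter s t ≠ [] ↔ ∃ x, x ∈ s ∧ x ∈ t := by
  constructor
  · intro h
    obtain ⟨x, hx⟩ := List.exists_mem_of_ne_nil _ h
    exact ⟨x, (PySem.Set.mem_inter s t x).mp hx⟩
  · rintro ⟨x, hx⟩ h
    exact absurd (h ▸ (PySem.Set.mem_inter s t x).mpr hx) (List.not_mem_nil)

def aTail (lowered : PySem.Set String) : String :=
  if lowered = [] then "unknown"
  else if PySem.Set.inter lowered (PySem.Set.ofList ["active", "scheduled", "initial_indexing"]) ≠ [] then "active"
  else if PySem.Set.contains lowered "paused" then "paused"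
  else if PySem.Set.contains lowered "deleting" then "deleting"
  else if PySem.Set.contains lowered "invalid" then "invalid"
  else PySem.List.pyGetD (PySem.List.sorted lowered (fun x => x) false) 0 ""

theorem a_eq (cs : List String) :
    derive_connector_status_py cs =
      aTail (PySem.Set.ofList ((cs.filter (fun c => !(c == ""))).map PySem.Str.lower)) := rfl

-- rank facts about dcsKey
theorem dcsKey_group (s : String) (h : s = "active" ∨ s = "scheduled" ∨ s = "initial_indexing") :
    dcsKey s = (0, "active") := by
  rw [dcsKey_spec]; simp [h]

theorem dcsKey_fst_le_zero (s : String) (h : (dcsKey s).1 ≤ 0) :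
    dcsKey s = (0, "active") ∧ (s = "active" ∨ s = "scheduled" ∨ s = "initial_indexing") := by
  rw [dcsKey_spec] at h ⊢
  split_ifs at h ⊢ <;> simp_all

theorem dcsKey_fst_le_one (s : String) (hg : ¬(s = "active" ∨ s = "scheduled" ∨ s = "initial_indexing"))
    (h : (dcsKey s).1 ≤ 1) : dcsKey s = (1, "paused") ∧ s = "paused" := by
  rw [dcsKey_spec] at h ⊢
  split_ifs at h ⊢ <;> simp_all

theorem dcsKey_fst_le_two (s : String) (hg : ¬(s = "active" ∨ s = "scheduled" ∨ s = "initial_indexing"))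
    (hp : s ≠ "paused") (h : (dcsKey s).1 ≤ 2) : dcsKey s = (2, "deleting") ∧ s = "deleting" := by
  rw [dcsKey_spec] at h ⊢
  split_ifs at h ⊢ <;> simp_all

theorem dcsKey_fst_le_three (s : String) (hg : ¬(s = "active" ∨ s = "scheduled" ∨ s = "initial_indexing"))
    (hp : s ≠ "paused") (hd : s ≠ "deleting") (h : (dcsKey s).1 ≤ 3) :
    dcsKey s = (3, "invalid") ∧ s = "invalid" := by
  rw [dcsKey_spec] at h ⊢
  split_ifs at h ⊢ <;> simp_all

theorem dcsKey_other (s : String) (hg : ¬(s = "active" ∨ s = "scheduled" ∨ s = "initial_indexing"))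
    (hp : s ≠ "paused") (hd : s ≠ "deleting") (hi : s ≠ "invalid") : dcsKey s = (4, s) := by
  rw [dcsKey_spec]; simp [hg, hp, hd, hi]

-- the B-side result as a function of the lowered, nonempty-filtered list L
theorem alt_eq (cs : List String) :
    derive_connector_status_py_alt cs =
      match (((cs.filter (fun c => !(c == ""))).map PySem.Str.lower).map dcsKey).foldl minKey none with
      | none => "unknown"
      | some b => b.2 := by
  unfold derive_connector_status_py_alt
  rw [foldl_dcsStep_eq]

theorem tails_eq (L : List String) :
    aTail (PySem.Set.ofList L) =
      match (L.map dcsKey).foldl minKey none with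
      | none => "unknown"
      | some b => b.2 := by
  by_cases hL : L = []
  · subst hL; rfl
  · have hset : PySem.Set.ofList L ≠ [] := by simpa [ofList_eq_nil_iff] using hL
    have hKne : L.map dcsKey ≠ [] := by simpa using hL
    obtain ⟨m, hm1, hm2, hm3⟩ := minKey_none (L.map dcsKey) hKne
    obtain ⟨z, hzL, hzm⟩ := List.mem_map.mp hm2
    have hgroup : (PySem.Set.inter (PySem.Set.ofList L)
        (PySem.Set.ofList ["active", "scheduled", "initial_indexing"]) ≠ []) ↔
        ("active" ∈ L ∨ "scheduled" ∈ L ∨ "initial_indexing" ∈ L) := by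
      rw [inter_ne_nil_iff]
      constructor
      · rintro ⟨x, hx1, hx2⟩
        rw [PySem.Set.mem_ofList] at hx1 hx2
        simp only [List.mem_cons, List.not_mem_nil, or_false] at hx2
        rcases hx2 with h | h | h <;> subst h
        · exact Or.inl hx1
        · exact Or.inr (Or.inl hx1)
        · exact Or.inr (Or.inr hx1)
      · rintro (h | h | h) <;>
          exact ⟨_, (PySem.Set.mem_ofList _ _).mpr h, by decide⟩
    have hcontains : ∀ a : String, PySem.Set.contains (PySem.Set.ofList L) a = true ↔ a ∈ L := by
      intro a
      rw [PySem.Set.contains_iff, PySem.Set.mem_ofList]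
    unfold aTail
    rw [if_neg hset, hm1]
    by_cases hA : "active" ∈ L ∨ "scheduled" ∈ L ∨ "initial_indexing" ∈ L
    · rw [if_pos (hgroup.mpr hA)]
      -- some status of the active group is present, so the key (0,"active") occurs
      have hk0 : ((0 : Int), "active") ∈ L.map dcsKey := by
        rcases hA with h | h | h <;>
          exact List.mem_map.mpr ⟨_, h, dcsKey_group _ (by simp)⟩
      have hle := hm3 _ hk0
      have hm0 : m.1 ≤ 0 := by
        rcases (Prod.Lex.le_iff).mp hle with h | h
        · exact le_of_lt h
        · exact le_of_eq h.1
      rw [← hzm] at hm0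
      rw [← hzm, (dcsKey_fst_le_zero z hm0).1]
    · rw [if_neg (fun h => hA (hgroup.mp h))]
      have hzg : ¬(z = "active" ∨ z = "scheduled" ∨ z = "initial_indexing") := by
        rintro (h | h | h) <;> exact hA (by subst h; tauto)
      by_cases hP : "paused" ∈ L
      · rw [if_pos ((hcontains _).mpr hP)]
        have hk1 : ((1 : Int), "paused") ∈ L.map dcsKey :=
          List.mem_map.mpr ⟨_, hP, by rw [dcsKey_spec]; simp⟩
        have hle := hm3 _ hk1
        have hmr : m.1 ≤ 1 := by
          rcases (Prod.Lex.le_iff).mp hle with h | h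
          · exact le_of_lt h
          · exact le_of_eq h.1
        rw [← hzm] at hmr
        rw [← hzm, (dcsKey_fst_le_one z hzg hmr).1]
      · rw [if_neg (by simpa [hcontains] using hP)]
        have hzp : z ≠ "paused" := fun h => hP (h ▸ hzL)
        by_cases hD : "deleting" ∈ L
        · rw [if_pos ((hcontains _).mpr hD)]
          have hk2 : ((2 : Int), "deleting") ∈ L.map dcsKey :=
            List.mem_map.mpr ⟨_, hD, by rw [dcsKey_spec]; simp⟩
          have hle := hm3 _ hk2
          have hmr : m.1 ≤ 2 := by
            rcases (Prod.Lex.le_iff).mp hle with h | h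
            · exact le_of_lt h
            · exact le_of_eq h.1
          rw [← hzm] at hmr
          rw [← hzm, (dcsKey_fst_le_two z hzg hzp hmr).1]
        · rw [if_neg (by simpa [hcontains] using hD)]
          have hzd : z ≠ "deleting" := fun h => hD (h ▸ hzL)
          by_cases hI : "invalid" ∈ L
          · rw [if_pos ((hcontains _).mpr hI)]
            have hk3 : ((3 : Int), "invalid") ∈ L.map dcsKey :=
              List.mem_map.mpr ⟨_, hI, by rw [dcsKey_spec]; simp⟩
            have hle := hm3 _ hk3
            have hmr : m.1 ≤ 3 := by
              rcases (Prod.Lex.le_iff).mp hle with h | h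
              · exact le_of_lt h
              · exact le_of_eq h.1
            rw [← hzm] at hmr
            rw [← hzm, (dcsKey_fst_le_three z hzg hzp hzd hmr).1]
          · rw [if_neg (by simpa [hcontains] using hI)]
            -- last branch: every status maps to (4, itself); m carries the minimum string
            have hother : ∀ y ∈ L, dcsKey y = (4, y) := by
              intro y hy
              refine dcsKey_other y ?_ (fun h => hP (h ▸ hy)) (fun h => hD (h ▸ hy))
                (fun h => hI (h ▸ hy))
              rintro (h | h | h) <;> exact hA (by subst h; tauto)
            have hmz : m = (4, z) := by rw [← hzm, hother z hzL]
            have hzmin : ∀ y ∈ L, z ≤ y := by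
              intro y hy
              have h := hm3 _ (List.mem_map.mpr ⟨y, hy, rfl⟩)
              rw [hmz, hother y hy] at h
              rcases (Prod.Lex.le_iff).mp h with h' | h'
              · exact absurd h' (by simp)
              · exact h'.2
            have hsne : PySem.List.sorted (PySem.Set.ofList L) (fun x => x) false ≠ [] := by
              simpa [PySem.List.sorted_eq_nil_iff] using hset
            obtain ⟨mh, t, hmt⟩ := List.exists_cons_of_ne_nil hsne
            have hmhmem : mh ∈ L := by
              have : mh ∈ PySem.List.sorted (PySem.Set.ofList L) (fun x => x) false := by
                rw [hmt]; simp
              rw [PySem.List.mem_sorted, PySem.Set.mem_ofList] at this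
              exact this
            have hmhle : ∀ y ∈ L, mh ≤ y := by
              intro y hy
              exact PySem.List.key_head_sorted_le (PySem.Set.ofList L) (fun x => x) hmt y
                ((PySem.Set.mem_ofList _ _).mpr hy)
            have hmeq : mh = z := le_antisymm (hmhle z hzL) (hzmin mh hmhmem)
            rw [hmt, hmz]
            simp [PySem.List.pyGetD, PySem.List.pyGet?, PySem.List.pyIdx?, hmeq]

-- ===== VERDICT (by name: the statement is the Claim_ definition above) =====
theorem derive_connector_status_py_spec : Claim_equal_derive_connector_status_py := by
  intro cs _
  unfold Spec_derive_connector_status_py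
  rw [a_eq, alt_eq, tails_eq]
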